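-- pv_equiv track=rewrite | github.com/DivyanshHarne/Data-Structures | codevita/justifywords.py | max_words_fitted
-- ===== SOURCE A (Python) =====
-- def max_words_fitted(k, words, n, m):
--     # filter out words that can't fit in a single line
--     words = [word for word in words if len(word) <= m]
--
--     def backtrack(index, lines):
--         # If we've exhausted the word list, return the count of placed words
--         if index == len(words):
--             return sum(len(line.split()) for line in lines)
--
--         max_words = 0
--         word = words[index]
--
--         for i in range(len(lines)):
--             # check if the word can be appended to the current line
--             if len(lines[i]) + len(word) + (1 if lines[i] else 0) <= m:
--                 original_line = lines[i]
--                 lines[i] += (" " if lines[i] else "") + word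
--                 max_words = max(max_words, backtrack(index + 1, lines))
--                 lines[i] = original_line  # backtrack
--
--         # Try placing the word in a new line if lines are available
--         if len(lines) < n:
--             lines.append(word)
--             max_words = max(max_words, backtrack(index + 1, lines))
--             lines.pop()  # Backtrack
--
--         return max_words
--
--     # Start the backtracking with an empty set of lines
--     return backtrack(0, [])
-- ===== SOURCE B (Python) =====
-- def max_words_fitted(k, words, n, m):
--     # All-or-nothing: A's backtracking returns the full token count iff the
--     # filtered words can be packed into at most n lines of width m, else 0.
--     # So decide feasibility over integer line loads and compute the count once.
--     ws = [w for w in words if len(w) <= m]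
--     total = sum(len(w.split()) for w in ws)
--
--     def feasible(sizes, loads):
--         if not sizes:
--             return True
--         lw, rest = sizes[0], sizes[1:]
--         for j, u in enumerate(loads):
--             nu = u + lw + (1 if u else 0)
--             if nu <= m and feasible(rest, loads[:j] + [nu] + loads[j + 1:]):
--                 return True
--         return len(loads) < n and feasible(rest, loads + [lw])
--
--     return total if feasible([len(w) for w in ws], []) else 0
-- ===== Notes on version B (the rewrite author's own statement) =====
-- stated objective: alternative
-- what changed: A backtracks over actual line strings, re-splitting every line at every leaf and taking the max over all complete placements; B collapses the search to a boolean bin-packing feasibility test over integer line loads with early exit, and computes the (constant) token total once by a closed formula.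
import Mathlib
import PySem

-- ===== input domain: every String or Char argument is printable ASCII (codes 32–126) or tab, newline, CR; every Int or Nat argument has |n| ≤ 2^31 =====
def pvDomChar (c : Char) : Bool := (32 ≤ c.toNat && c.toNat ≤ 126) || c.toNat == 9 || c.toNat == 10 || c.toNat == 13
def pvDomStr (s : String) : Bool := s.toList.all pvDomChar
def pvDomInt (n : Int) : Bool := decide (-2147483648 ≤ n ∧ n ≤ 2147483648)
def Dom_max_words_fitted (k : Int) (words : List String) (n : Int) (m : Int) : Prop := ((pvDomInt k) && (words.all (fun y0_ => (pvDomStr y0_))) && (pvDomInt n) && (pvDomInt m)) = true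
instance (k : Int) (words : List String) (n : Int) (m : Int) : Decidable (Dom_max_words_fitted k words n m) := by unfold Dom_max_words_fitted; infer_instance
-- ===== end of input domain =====

-- B replaces A's max-over-all-placements search over actual line strings by a boolean
-- bin-packing feasibility test over integer line loads plus a closed-form token total.


-- ===== PORT A =====
-- len(line.split()) : number of whitespace-separated tokens
def pvTok (s : String) : Int := ((PySem.Str.split₀ s).length : Int)

-- backtrack(index, lines), recursion on the remaining suffix words[index:]
def pvBtA (n m : Int) : List String → List String → Int
  | [], lines => lines.foldl (fun a l => a + pvTok l) 0
  | w :: rest, lines =>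
    let mw := (List.range lines.length).foldl (fun acc i =>
        let li := lines.getD i ""
        if PySem.Str.len li + PySem.Str.len w + (if li ≠ "" then 1 else 0) ≤ m then
          max acc (pvBtA n m rest (lines.set i (li ++ (if li ≠ "" then " " else "") ++ w)))
        else acc) 0
    if (lines.length : Int) < n then max mw (pvBtA n m rest (lines ++ [w])) else mw

def max_words_fitted (k : Int) (words : List String) (n : Int) (m : Int) : Int :=
  pvBtA n m (words.filter (fun w => decide (PySem.Str.len w ≤ m))) []

-- ===== PORT B =====
-- feasible(sizes, loads): can words of these lengths be packed into ≤ n lines of width m?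
def pvFeasB (n m : Int) : List Int → List Int → Bool
  | [], _ => true
  | lw :: rest, loads =>
    ((List.range loads.length).any (fun j =>
        let u := loads.getD j 0
        decide (u + lw + (if u ≠ 0 then 1 else 0) ≤ m) &&
          pvFeasB n m rest (loads.set j (u + lw + (if u ≠ 0 then 1 else 0)))))
    || (decide ((loads.length : Int) < n) && pvFeasB n m rest (loads ++ [lw]))

def max_words_fitted_alt (k : Int) (words : List String) (n : Int) (m : Int) : Int :=
  let ws := words.filter (fun w => decide (PySem.Str.len w ≤ m))
  let total := ws.foldl (fun a w => a + pvTok w) 0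
  if pvFeasB n m (ws.map PySem.Str.len) [] then total else 0

-- ===== PRECONDITION & SPEC =====
def Spec_max_words_fitted (k : Int) (words : List String) (n : Int) (m : Int) (out : Int) : Prop := out = max_words_fitted_alt k words n m
instance (k : Int) (words : List String) (n : Int) (m : Int) (out : Int) : Decidable (Spec_max_words_fitted k words n m out) := by unfold Spec_max_words_fitted; infer_instance

-- ===== CLAIM (what is proved, stated in full; the proofs are below) =====
def Claim_equal_max_words_fitted : Prop := ∀ (k : Int) (words : List String) (n : Int) (m : Int), Dom_max_words_fitted k words n m → Spec_max_words_fitted k words n m (max_words_fitted k words n m)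

-- ===== LEMMAS AND PROOFS =====

-- token-count sum of a list of strings (the value A sums at its leaves)
def pvTokS (l : List String) : Int := l.foldl (fun a s => a + pvTok s) 0

-- B's per-line condition and updated loads, as named abbreviations for the proofs
def pvCnd (m lw : Int) (loads : List Int) (j : Nat) : Bool :=
  decide (loads.getD j 0 + lw + (if loads.getD j 0 ≠ 0 then 1 else 0) ≤ m)

def pvNewLoads (lw : Int) (loads : List Int) (j : Nat) : List Int :=
  loads.set j (loads.getD j 0 + lw + (if loads.getD j 0 ≠ 0 then 1 else 0))

theorem pvFeasB_cons (n m lw : Int) (rest loads : List Int) :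
    pvFeasB n m (lw :: rest) loads =
      (((List.range loads.length).any (fun j =>
          pvCnd m lw loads j && pvFeasB n m rest (pvNewLoads lw loads j)))
        || (decide ((loads.length : Int) < n) && pvFeasB n m rest (loads ++ [lw]))) := rfl

theorem pvFoldl_tok_shift : ∀ (l : List String) (a : Int),
    l.foldl (fun a s => a + pvTok s) a = a + l.foldl (fun a s => a + pvTok s) 0 := by
  intro l
  induction l with
  | nil => intro a; simp
  | cons x tl ih =>
    intro a
    simp only [List.foldl_cons]
    rw [ih (a + pvTok x), ih (0 + pvTok x)]
    ring

theorem pvTokS_cons (x : String) (l : List String) : pvTokS (x :: l) = pvTok x + pvTokS l := by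
  unfold pvTokS
  simp only [List.foldl_cons]
  rw [pvFoldl_tok_shift]
  ring

theorem pvTok_nonneg (s : String) : 0 ≤ pvTok s := by
  unfold pvTok; exact Int.natCast_nonneg _

theorem pvTokS_nonneg : ∀ (l : List String), 0 ≤ pvTokS l := by
  intro l
  induction l with
  | nil => simp [pvTokS]
  | cons x tl ih => rw [pvTokS_cons]; have := pvTok_nonneg x; omega

theorem pvTokS_append (l1 l2 : List String) : pvTokS (l1 ++ l2) = pvTokS l1 + pvTokS l2 := by
  induction l1 with
  | nil => simp [pvTokS]
  | cons x tl ih => simp only [List.cons_append, pvTokS_cons, ih]; ring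

theorem pvTokS_set : ∀ (l : List String) (i : Nat) (x : String), i < l.length →
    pvTokS (l.set i x) = pvTokS l - pvTok (l.getD i "") + pvTok x := by
  intro l
  induction l with
  | nil => intro i x h; simp at h
  | cons a tl ih =>
    intro i x h
    cases i with
    | zero => simp [pvTokS_cons]; ring
    | succ j =>
      have hj : j < tl.length := by simpa using h
      simp only [List.set_cons_succ, pvTokS_cons, ih j x hj, List.getD_cons_succ]
      ring

-- split₀.go with a nonempty accumulator just prepends the reversed accumulator
theorem pvGo_acc : ∀ (xs : List Char) (cur : List Char) (acc : List (List Char)),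
    PySem.Chars.split₀.go xs cur acc = acc.reverse ++ PySem.Chars.split₀.go xs cur [] := by
  intro xs
  induction xs with
  | nil =>
    intro cur acc
    simp only [PySem.Chars.split₀.go]
    by_cases h : cur.isEmpty <;> simp [h]
  | cons c rest ih =>
    intro cur acc
    simp only [PySem.Chars.split₀.go]
    by_cases hs : PySem.Chars.isspace c
    · simp only [hs, ite_true]
      by_cases he : cur.isEmpty
      · simp only [he, ite_true]
        exact ih [] acc
      · simp only [he, Bool.false_eq_true, ite_false]
        rw [ih [] (cur.reverse :: acc), ih [] [cur.reverse]]
        simp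
    · simp only [hs, Bool.false_eq_true, ite_false]
      exact ih (c :: cur) acc

-- splitting at an explicit space splits the whitespace-split
theorem pvGo_space : ∀ (xs ds cur : List Char),
    PySem.Chars.split₀.go (xs ++ ' ' :: ds) cur [] =
      PySem.Chars.split₀.go xs cur [] ++ PySem.Chars.split₀.go ds [] [] := by
  intro xs
  induction xs with
  | nil =>
    intro ds cur
    have hsp : PySem.Chars.isspace ' ' = true := by decide
    simp only [List.nil_append, PySem.Chars.split₀.go, hsp, ite_true]
    by_cases he : cur.isEmpty
    · simp [he]
    · simp only [he, Bool.false_eq_true, ite_false]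
      rw [pvGo_acc ds [] [cur.reverse]]
  | cons c rest ih =>
    intro ds cur
    simp only [List.cons_append, PySem.Chars.split₀.go]
    by_cases hs : PySem.Chars.isspace c
    · simp only [hs, ite_true]
      by_cases he : cur.isEmpty
      · simp only [he, ite_true]
        exact ih ds []
      · simp only [he, Bool.false_eq_true, ite_false]
        rw [pvGo_acc (rest ++ ' ' :: ds) [] [cur.reverse], ih ds [],
          pvGo_acc rest [] [cur.reverse]]
        simp
    · simp only [hs, Bool.false_eq_true, ite_false]
      exact ih ds (c :: cur)

theorem pvChars_split_space (a b : List Char) :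
    PySem.Chars.split₀ (a ++ ' ' :: b) = PySem.Chars.split₀ a ++ PySem.Chars.split₀ b := by
  simp only [PySem.Chars.split₀]
  exact pvGo_space a b []

theorem pvTok_toList (s : String) : pvTok s = ((PySem.Chars.split₀ s.toList).length : Int) := by
  have h : PySem.Str.split₀ s = (PySem.Chars.split₀ s.toList).map String.ofList := rfl
  simp [pvTok, h]

theorem pvTok_space (a b : String) : pvTok (a ++ " " ++ b) = pvTok a + pvTok b := by
  rw [pvTok_toList, pvTok_toList, pvTok_toList]
  have h : (a ++ " " ++ b).toList = a.toList ++ ' ' :: b.toList := by simp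
  rw [h, pvChars_split_space]
  push_cast [List.length_append]
  ring

theorem pvTok_word (li w : String) :
    pvTok (li ++ (if li ≠ "" then " " else "") ++ w) = pvTok li + pvTok w := by
  by_cases h : li = ""
  · subst h
    have he : pvTok "" = 0 := by decide
    simp [he]
  · simp only [h, ne_eq, not_false_iff, if_true]
    exact pvTok_space li w

theorem pvLen_empty : PySem.Str.len "" = 0 := by decide

theorem pvLen_word (li w : String) :
    PySem.Str.len (li ++ (if li ≠ "" then " " else "") ++ w) =
      PySem.Str.len li + PySem.Str.len w + (if li ≠ "" then 1 else 0) := by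
  by_cases hz : li = ""
  · subst hz
    simp [PySem.Str.len_eq]
  · simp only [hz, ne_eq, not_false_iff, ite_true]
    simp [PySem.Str.len_eq]
    ring

-- a foldl taking max over branches that are each either 0 or the constant T
theorem pvMaxfold (T : Int) (hT : 0 ≤ T) (C F : Nat → Bool) :
    ∀ (l : List Nat) (acc : Int), 0 ≤ acc →
    l.foldl (fun a i => if C i then max a (if F i then T else 0) else a) acc
      = max acc (if l.any (fun i => C i && F i) then T else 0) := by
  intro l
  induction l with
  | nil => intro acc h; simp [max_eq_left h]
  | cons i tl ih =>
    intro acc h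
    simp only [List.foldl_cons, List.any_cons]
    by_cases hc : C i = true
    · by_cases hf : F i = true
      · simp only [hc, hf, ite_true, Bool.true_and, Bool.true_or]
        rw [ih (max acc T) (le_trans h (le_max_left _ _))]
        cases han : tl.any (fun i => C i && F i) <;>
          simp only [han, ite_true, ite_false, Bool.false_eq_true, max_def] <;>
          split_ifs <;> omega
      · have hf' : F i = false := by simpa using hf
        simp only [hc, hf', ite_true, Bool.false_eq_true, ite_false, Bool.true_and,
          Bool.false_or]
        rw [max_eq_left h]
        exact ih acc h
    · have hc' : C i = false := by simpa using hc
      simp only [hc', Bool.false_eq_true, ite_false, Bool.false_and, Bool.false_or]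
      exact ih acc h

theorem pvKey (n m : Int) : ∀ (rem lines : List String),
    pvBtA n m rem lines =
      if pvFeasB n m (rem.map PySem.Str.len) (lines.map PySem.Str.len) then
        pvTokS lines + pvTokS rem
      else 0 := by
  intro rem
  induction rem with
  | nil =>
    intro lines
    rw [show pvBtA n m [] lines = pvTokS lines from rfl]
    simp only [List.map_nil, pvFeasB, ite_true]
    rw [show pvTokS ([] : List String) = 0 from rfl]
    ring
  | cons w rest ih =>
    intro lines
    have hT : 0 ≤ pvTokS lines + pvTok w + pvTokS rest := by
      have h1 := pvTokS_nonneg lines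
      have h2 := pvTok_nonneg w
      have h3 := pvTokS_nonneg rest
      omega
    have hfold :
        (List.range lines.length).foldl (fun acc i =>
          let li := lines.getD i ""
          if PySem.Str.len li + PySem.Str.len w + (if li ≠ "" then 1 else 0) ≤ m then
            max acc (pvBtA n m rest (lines.set i (li ++ (if li ≠ "" then " " else "") ++ w)))
          else acc) 0
        = (List.range lines.length).foldl (fun acc i =>
            if (fun j => pvCnd m (PySem.Str.len w) (lines.map PySem.Str.len) j) i then
              max acc (if (fun j => pvFeasB n m (rest.map PySem.Str.len)
                  (pvNewLoads (PySem.Str.len w) (lines.map PySem.Str.len) j)) i then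
                pvTokS lines + pvTok w + pvTokS rest else 0)
            else acc) 0 := by
      apply PySem.List.foldl_congr_mem
      intro acc i hi
      have hilt : i < lines.length := List.mem_range.mp hi
      have h1 : i < (lines.map PySem.Str.len).length := by simpa using hilt
      have hmgd : (lines.map PySem.Str.len).getD i 0 = PySem.Str.len (lines.getD i "") := by
        rw [List.getD_eq_getElem _ _ h1, List.getD_eq_getElem _ _ hilt, List.getElem_map]
      have hzero : PySem.Str.len (lines.getD i "") = 0 ↔ lines.getD i "" = "" := by
        simp [PySem.Str.len_eq]
      have hsep : (if (lines.map PySem.Str.len).getD i 0 ≠ 0 then (1 : Int) else 0)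
          = (if lines.getD i "" ≠ "" then 1 else 0) := by
        rw [hmgd]
        by_cases hz : lines.getD i "" = ""
        · have h0 : PySem.Str.len (lines.getD i "") = 0 := by rw [hz]; exact pvLen_empty
          simp [hz, h0]
        · have h0 : PySem.Str.len (lines.getD i "") ≠ 0 := fun h => hz (hzero.mp h)
          simp [hz, h0]
      simp only []
      by_cases hp : PySem.Str.len (lines.getD i "") + PySem.Str.len w +
          (if lines.getD i "" ≠ "" then 1 else 0) ≤ m
      · have hc : pvCnd m (PySem.Str.len w) (lines.map PySem.Str.len) i = true := by
          unfold pvCnd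
          rw [hsep, hmgd]
          exact decide_eq_true hp
        rw [if_pos hp, if_pos hc]
        have hX : (lines.set i (lines.getD i "" ++ (if lines.getD i "" ≠ "" then " " else "") ++ w)).map
              PySem.Str.len = pvNewLoads (PySem.Str.len w) (lines.map PySem.Str.len) i := by
          unfold pvNewLoads
          rw [List.map_set, hsep, hmgd, pvLen_word]
        have htk : pvTokS (lines.set i (lines.getD i "" ++ (if lines.getD i "" ≠ "" then " " else "") ++ w))
            = pvTokS lines + pvTok w := by
          rw [pvTokS_set _ _ _ hilt, pvTok_word]
          ring
        rw [ih, hX, htk]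
      · have hc : ¬ pvCnd m (PySem.Str.len w) (lines.map PySem.Str.len) i = true := by
          unfold pvCnd
          rw [hsep, hmgd]
          simp only [decide_eq_true_eq]
          exact hp
        rw [if_neg hp, if_neg hc]
    rw [show pvBtA n m (w :: rest) lines =
        (if (lines.length : Int) < n then
          max ((List.range lines.length).foldl (fun acc i =>
            let li := lines.getD i ""
            if PySem.Str.len li + PySem.Str.len w + (if li ≠ "" then 1 else 0) ≤ m then
              max acc (pvBtA n m rest (lines.set i (li ++ (if li ≠ "" then " " else "") ++ w)))
            else acc) 0) (pvBtA n m rest (lines ++ [w]))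
        else ((List.range lines.length).foldl (fun acc i =>
            let li := lines.getD i ""
            if PySem.Str.len li + PySem.Str.len w + (if li ≠ "" then 1 else 0) ≤ m then
              max acc (pvBtA n m rest (lines.set i (li ++ (if li ≠ "" then " " else "") ++ w)))
            else acc) 0)) from rfl]
    rw [hfold, pvMaxfold _ hT _ _ (List.range lines.length) 0 le_rfl]
    rw [List.map_cons, pvFeasB_cons, ih (lines ++ [w])]
    have happ : pvTokS (lines ++ [w]) = pvTokS lines + pvTok w := by
      rw [pvTokS_append, pvTokS_cons]
      rw [show pvTokS ([] : List String) = 0 from rfl]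
      ring
    rw [List.map_append, List.map_cons, List.map_nil, happ, pvTokS_cons, List.length_map]
    by_cases hn : (lines.length : Int) < n
    · have hd : decide ((lines.length : Int) < n) = true := decide_eq_true hn
      rw [if_pos hn, hd]
      cases han : (List.range lines.length).any (fun i =>
          pvCnd m (PySem.Str.len w) (lines.map PySem.Str.len) i &&
            pvFeasB n m (rest.map PySem.Str.len)
              (pvNewLoads (PySem.Str.len w) (lines.map PySem.Str.len) i)) <;>
        cases hfa : pvFeasB n m (rest.map PySem.Str.len)
            (lines.map PySem.Str.len ++ [PySem.Str.len w]) <;>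
        simp only [han, hfa, Bool.false_or, Bool.true_or, Bool.true_and, Bool.false_and,
          Bool.or_self, ite_true, ite_false, Bool.false_eq_true, max_def] <;>
        split_ifs <;> omega
    · have hd : decide ((lines.length : Int) < n) = false := decide_eq_false hn
      rw [if_neg hn, hd]
      cases han : (List.range lines.length).any (fun i =>
          pvCnd m (PySem.Str.len w) (lines.map PySem.Str.len) i &&
            pvFeasB n m (rest.map PySem.Str.len)
              (pvNewLoads (PySem.Str.len w) (lines.map PySem.Str.len) i)) <;>
        simp only [han, Bool.false_and, Bool.false_or, Bool.or_false, Bool.false_eq_true,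
          ite_true, ite_false, max_def] <;>
        split_ifs <;> omega

-- ===== VERDICT (by name: the statement is the Claim_ definition above) =====
theorem max_words_fitted_spec : Claim_equal_max_words_fitted := by
  intro k words n m _hd
  show _ = _
  unfold max_words_fitted max_words_fitted_alt
  rw [pvKey]
  simp only [List.map_nil]
  rw [show pvTokS ([] : List String) = 0 from rfl]
  rw [show pvTokS (words.filter (fun w => decide (PySem.Str.len w ≤ m))) =
      (words.filter (fun w => decide (PySem.Str.len w ≤ m))).foldl (fun a w => a + pvTok w) 0 from rfl]
  ring_nf
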